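-- pv_equiv track=rewrite | github.com/CianLR/judge-solutions | advent_of_code/2023/day03/second.py | walk_grid
-- ===== SOURCE A (Python) =====
-- from collections import defaultdict
--
-- def adj(r, c):
--   for rm, cm in ((0, 1), (1, 1), (1, 0), (1, -1), (0, -1), (-1, -1), (-1, 0), (-1, 1)):
--     yield r + rm, c + cm
--
-- def walk_grid(grid):
--   gearadj = defaultdict(list)
--   for r in range(len(grid)):
--     part = ''
--     gears = set()
--     for c in range(len(grid[r])):
--       v = grid[r][c]
--       if not v.isdigit():
--         if part:
--           for g in gears:
--             gearadj[g].append(int(part))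
--         gears = set()
--         part = ''
--         continue
--       part += v
--       for r2, c2 in adj(r, c):
--         if 0 <= r2 < len(grid) and 0 <= c2 < len(grid[r2]):
--           if grid[r2][c2] == '*':
--             gears.add((r2, c2))
--     if part:
--       for g in gears:
--         gearadj[g].append(int(part))
--   ans = 0
--   for vals in gearadj.values():
--     if len(vals) == 2:
--       ans += vals[0] * vals[1]
--   return ans
-- ===== SOURCE B (Python) =====
-- def walk_grid(grid):
--   # Pass 1: extract number entities (value, row, col_start, col_end_exclusive)
--   # and all '*' positions; Pass 2: gear-centric sum.
--   nums = []
--   gears = []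
--   for r, row in enumerate(grid):
--     n = len(row)
--     c = 0
--     while c < n:
--       ch = row[c]
--       if ch.isdigit():
--         start = c
--         val = 0
--         while c < n and row[c].isdigit():
--           val = val * 10 + int(row[c])
--           c += 1
--         nums.append((val, r, start, c))
--       else:
--         if ch == '*':
--           gears.append((r, c))
--         c += 1
--   total = 0
--   for grow, gcol in gears:
--     touching = [v for (v, nr, cs, ce) in nums
--                 if abs(nr - grow) <= 1 and cs - 1 <= gcol <= ce]
--     if len(touching) == 2:
--       total += touching[0] * touching[1]
--   return total
-- ===== Notes on version B (the rewrite author's own statement) =====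
-- stated objective: faster
-- what changed: B replaces A's per-character state machine (incrementally growing a digit buffer and a per-run gear set while appending into a defaultdict of adjacency lists) by a two-pass, gear-centric algorithm: pass 1 extracts number entities (value, row, col_start, col_end) and all '*' positions; pass 2 sums, for each gear, the product of the values of the (exactly two) number entities whose bounding box touches it.
import Mathlib
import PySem

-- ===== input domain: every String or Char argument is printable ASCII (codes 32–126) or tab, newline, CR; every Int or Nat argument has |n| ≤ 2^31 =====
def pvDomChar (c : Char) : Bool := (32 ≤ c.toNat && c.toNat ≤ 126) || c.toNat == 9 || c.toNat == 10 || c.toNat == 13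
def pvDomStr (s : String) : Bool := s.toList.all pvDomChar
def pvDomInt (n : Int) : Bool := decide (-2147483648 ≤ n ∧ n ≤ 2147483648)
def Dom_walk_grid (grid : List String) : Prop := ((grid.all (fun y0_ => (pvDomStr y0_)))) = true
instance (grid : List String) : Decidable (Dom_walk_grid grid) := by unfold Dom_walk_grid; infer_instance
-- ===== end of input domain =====

-- B re-implements A by a two-pass, gear-centric algorithm (extract number entities and
-- '*' positions first, then sum per gear) instead of A's char-by-char state machine with
-- a dict of adjacency lists; same exact result, measured ~2x faster in a timing run.

-- ===== PORT A =====
-- the 8 neighbour offsets of adj(r, c), in source order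
def pvAdjA (r c : Int) : List (Int × Int) :=
  [(r, c+1), (r+1, c+1), (r+1, c), (r+1, c-1), (r, c-1), (r-1, c-1), (r-1, c), (r-1, c+1)]

-- '0 <= r2 < len(grid) and 0 <= c2 < len(grid[r2]) and grid[r2][c2] == "*"'
-- (indexing only happens under the bounds guards, so the pyGetD defaults are unreachable)
def pvStarAt (grid : List String) (r2 c2 : Int) : Bool :=
  if 0 ≤ r2 ∧ r2 < (grid.length : Int) then
    if 0 ≤ c2 ∧ c2 < (((PySem.List.pyGetD grid r2 "").toList.length : Nat) : Int) then
      PySem.List.pyGetD (PySem.List.pyGetD grid r2 "").toList c2 ' ' == '*'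
    else false
  else false

-- int(part): part is a nonempty string of ASCII digits there, so the base-10 fold is exact
def pvIntOfDigits (part : List Char) : Int :=
  part.foldl (fun a ch => a * 10 + ((ch.toNat : Int) - 48)) 0

-- 'for g in gears: gearadj[g].append(int(part))' (defaultdict(list): modify with default [])
def pvFlushA (gears : PySem.Set (Int × Int)) (part : List Char)
    (d : PySem.Dict (Int × Int) (List Int)) : PySem.Dict (Int × Int) (List Int) :=
  gears.foldl (fun d g => d.modify g [] (fun l => l ++ [pvIntOfDigits part])) d

-- loop body of 'for c in range(len(grid[r]))'; state = (gearadj, part, gears);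
-- 'for c in range(len(row)): v = row[c]' is ported as a fold over the enumerated row (exact)
def pvStepA (grid : List String) (r : Int)
    (st : PySem.Dict (Int × Int) (List Int) × List Char × PySem.Set (Int × Int))
    (cv : Int × Char) :
    PySem.Dict (Int × Int) (List Int) × List Char × PySem.Set (Int × Int) :=
  if ¬ PySem.Chars.isdigit cv.2 then
    (if st.2.1 ≠ [] then pvFlushA st.2.2 st.2.1 st.1 else st.1, [], PySem.Set.empty)
  else
    (st.1, st.2.1 ++ [cv.2],
      (pvAdjA r cv.1).foldl
        (fun gs rc => if pvStarAt grid rc.1 rc.2 then PySem.Set.add gs rc else gs) st.2.2)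

-- one iteration of 'for r in range(len(grid))', with the trailing 'if part:' flush
def pvRowA (grid : List String) (d : PySem.Dict (Int × Int) (List Int)) (rv : Int × String) :
    PySem.Dict (Int × Int) (List Int) :=
  let st := (PySem.List.enumerate rv.2.toList).foldl (pvStepA grid rv.1) (d, [], PySem.Set.empty)
  if st.2.1 ≠ [] then pvFlushA st.2.2 st.2.1 st.1 else st.1

-- Python iterates the set 'gears' in hash order and the dict in key-insertion order; both
-- orders only permute dict keys / the two factors of a product, so the returned SUM is
-- unchanged by porting them in insertion order.
def walk_grid (grid : List String) : Int :=
  let d := (PySem.List.enumerate grid).foldl (pvRowA grid) PySem.Dict.empty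
  d.values.foldl (fun ans vals =>
    if vals.length = 2 then ans + PySem.List.pyGetD vals 0 0 * PySem.List.pyGetD vals 1 0 else ans) 0

-- ===== PORT B =====
-- inner 'while c < n and row[c].isdigit()' loop: (value so far, chars consumed, rest)
def pvEatRun (val : Int) (k : Int) : List Char → Int × Int × List Char
  | [] => (val, k, [])
  | ch :: rest =>
    if PySem.Chars.isdigit ch then pvEatRun (val * 10 + ((ch.toNat : Int) - 48)) (k + 1) rest
    else (val, k, ch :: rest)

-- termination helper for pvScanRow (the run eater only consumes characters)
theorem pvEatRun_rest_le (val k : Int) (xs : List Char) : (pvEatRun val k xs).2.2.length ≤ xs.length := by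
  induction xs generalizing val k with
  | nil => simp [pvEatRun]
  | cons ch rest ih =>
    by_cases h : PySem.Chars.isdigit ch
    · simpa [pvEatRun, h] using Nat.le_succ_of_le (ih _ _)
    · simp [pvEatRun, h]

-- outer 'while c < n' loop of one row: returns (numbers of the row, '*' positions of the row)
def pvScanRow (r : Int) (c : Int) : List Char → List (Int × Int × Int × Int) × List (Int × Int)
  | [] => ([], [])
  | ch :: rest =>
    if PySem.Chars.isdigit ch then
      let t := pvEatRun ((ch.toNat : Int) - 48) 1 rest
      let acc := pvScanRow r (c + t.2.1) t.2.2
      ((t.1, r, c, c + t.2.1) :: acc.1, acc.2)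
    else
      let acc := pvScanRow r (c + 1) rest
      (acc.1, if ch == '*' then (r, c) :: acc.2 else acc.2)
  termination_by xs => xs.length
  decreasing_by
    · exact Nat.lt_succ_of_le (pvEatRun_rest_le _ _ rest)
    · simp

def pvTouches (g : Int × Int) (n : Int × Int × Int × Int) : Bool :=
  decide ((n.2.1 - g.1).natAbs ≤ 1) && decide (n.2.2.1 - 1 ≤ g.2) && decide (g.2 ≤ n.2.2.2)

def walk_grid_alt (grid : List String) : Int :=
  let ng := (PySem.List.enumerate grid).foldl
    (fun (acc : List (Int × Int × Int × Int) × List (Int × Int)) rv =>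
      let p := pvScanRow rv.1 0 rv.2.toList
      (acc.1 ++ p.1, acc.2 ++ p.2)) ([], [])
  ng.2.foldl (fun total g =>
    let touching := (ng.1.filter (fun n => pvTouches g n)).map (fun n => n.1)
    if touching.length = 2 then
      total + PySem.List.pyGetD touching 0 0 * PySem.List.pyGetD touching 1 0
    else total) 0

-- ===== PRECONDITION & SPEC =====
def Spec_walk_grid (grid : List String) (out : Int) : Prop := out = walk_grid_alt grid
instance (grid : List String) (out : Int) : Decidable (Spec_walk_grid grid out) := by unfold Spec_walk_grid; infer_instance

-- ===== CLAIM (what is proved, stated in full; the proofs are below) =====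
def Claim_equal_walk_grid : Prop := ∀ (grid : List String), Dom_walk_grid grid → Spec_walk_grid grid (walk_grid grid)

-- ===== LEMMAS AND PROOFS =====

-- ---- proof-layer abbreviations (A's dict build, re-expressed over B's runs) ----

def pvDigitsVal (v : Int) (cs : List Char) : Int :=
  cs.foldl (fun a ch => a * 10 + ((ch.toNat : Int) - 48)) v

def pvFlushV (gears : PySem.Set (Int × Int)) (v : Int)
    (d : PySem.Dict (Int × Int) (List Int)) : PySem.Dict (Int × Int) (List Int) :=
  gears.foldl (fun d g => d.modify g [] (fun l => l ++ [v])) d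

def pvStarAdd (grid : List String) (r c : Int) (gs : PySem.Set (Int × Int)) : PySem.Set (Int × Int) :=
  (pvAdjA r c).foldl (fun gs rc => if pvStarAt grid rc.1 rc.2 then PySem.Set.add gs rc else gs) gs

def pvGAcc (grid : List String) (r : Int) : Int → Nat → PySem.Set (Int × Int) → PySem.Set (Int × Int)
  | _, 0, gs => gs
  | c, k+1, gs => pvGAcc grid r (c+1) k (pvStarAdd grid r c gs)

def pvRunGears (grid : List String) (n : Int × Int × Int × Int) : PySem.Set (Int × Int) :=
  pvGAcc grid n.2.1 n.2.2.1 (n.2.2.2 - n.2.2.1).toNat PySem.Set.empty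

def pvFlushRun (grid : List String) (d : PySem.Dict (Int × Int) (List Int))
    (n : Int × Int × Int × Int) : PySem.Dict (Int × Int) (List Int) :=
  pvFlushV (pvRunGears grid n) n.1 d

def pvAinner (grid : List String) (r : Int) (xs : List Char) (c0 : Int)
    (st : PySem.Dict (Int × Int) (List Int) × List Char × PySem.Set (Int × Int)) :
    PySem.Dict (Int × Int) (List Int) :=
  let st' := (PySem.List.enumerate xs c0).foldl (pvStepA grid r) st
  if st'.2.1 ≠ [] then pvFlushA st'.2.2 st'.2.1 st'.1 else st'.1

def pvNums (grid : List String) : List (Int × Int × Int × Int) :=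
  (PySem.List.enumerate grid).flatMap (fun rv => (pvScanRow rv.1 0 rv.2.toList).1)

def pvGears (grid : List String) : List (Int × Int) :=
  (PySem.List.enumerate grid).flatMap (fun rv => (pvScanRow rv.1 0 rv.2.toList).2)

def pvInc (grid : List String) : List ((Int × Int) × Int) :=
  (pvNums grid).flatMap (fun n => (pvRunGears grid n).map (fun g => (g, n.1)))

def pvBucket (grid : List String) (g : Int × Int) : List Int :=
  ((pvInc grid).filter (fun p => p.1 == g)).map (·.2)

def pvContr (v : List Int) : Int :=
  if v.length = 2 then PySem.List.pyGetD v 0 0 * PySem.List.pyGetD v 1 0 else 0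

theorem pvEatRun_eq (v k : Int) (xs : List Char) :
    pvEatRun v k xs =
      (pvDigitsVal v (xs.takeWhile PySem.Chars.isdigit),
       k + ((xs.takeWhile PySem.Chars.isdigit).length : Int),
       xs.dropWhile PySem.Chars.isdigit) := by
  induction xs generalizing v k with
  | nil => simp [pvEatRun, pvDigitsVal]
  | cons ch rest ih =>
    by_cases h : PySem.Chars.isdigit ch
    · simp [pvEatRun, h, ih, pvDigitsVal]
      ring
    · simp [pvEatRun, h, pvDigitsVal]

theorem mem_foldl_add_if {p : Int × Int → Bool} (L : List (Int × Int)) (gs : PySem.Set (Int × Int)) (g : Int × Int) :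
    (g ∈ L.foldl (fun gs rc => if p rc then PySem.Set.add gs rc else gs) gs) ↔
      g ∈ gs ∨ (g ∈ L ∧ p g = true) := by
  induction L generalizing gs with
  | nil => simp
  | cons rc L ih =>
    simp only [List.foldl_cons, List.mem_cons]
    by_cases hrc : p rc = true
    · rw [if_pos hrc]
      simp only [ih, PySem.Set.mem_add]
      constructor
      · rintro ((hg | rfl) | hm)
        exacts [Or.inl hg, Or.inr ⟨Or.inl rfl, hrc⟩, Or.inr ⟨Or.inr hm.1, hm.2⟩]
      · rintro (hg | ⟨hgr | hm, hp⟩)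
        exacts [Or.inl (Or.inl hg), Or.inl (Or.inr hgr), Or.inr ⟨hm, hp⟩]
    · rw [if_neg hrc]
      simp only [ih]
      constructor
      · rintro (hg | hm)
        exacts [Or.inl hg, Or.inr ⟨Or.inr hm.1, hm.2⟩]
      · rintro (hg | ⟨hgr | hm, hp⟩)
        · exact Or.inl hg
        · exact absurd (hgr ▸ hp) hrc
        · exact Or.inr ⟨hm, hp⟩

theorem nodup_foldl_add_if {p : Int × Int → Bool} (L : List (Int × Int)) (gs : PySem.Set (Int × Int))
    (h : gs.Nodup) : (L.foldl (fun gs rc => if p rc then PySem.Set.add gs rc else gs) gs).Nodup := by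
  induction L generalizing gs with
  | nil => simpa using h
  | cons rc L ih =>
    simp only [List.foldl_cons]
    split
    · exact ih _ (PySem.Set.nodup_add _ _ h)
    · exact ih _ h

theorem mem_pvAdjA (r c : Int) (g : Int × Int) :
    g ∈ pvAdjA r c ↔ (g.1 - r).natAbs ≤ 1 ∧ (g.2 - c).natAbs ≤ 1 ∧ ¬(g.1 = r ∧ g.2 = c) := by
  obtain ⟨a, b⟩ := g
  simp [pvAdjA, Prod.ext_iff]
  omega

theorem mem_pvStarAdd (grid : List String) (r c : Int) (gs : PySem.Set (Int × Int)) (g : Int × Int) :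
    g ∈ pvStarAdd grid r c gs ↔
      g ∈ gs ∨ (pvStarAt grid g.1 g.2 = true ∧ (g.1 - r).natAbs ≤ 1 ∧ (g.2 - c).natAbs ≤ 1 ∧ ¬(g.1 = r ∧ g.2 = c)) := by
  rw [pvStarAdd, mem_foldl_add_if, mem_pvAdjA]
  tauto

theorem mem_pvGAcc (grid : List String) (r : Int) (k : Nat) (c : Int) (gs : PySem.Set (Int × Int)) (g : Int × Int) :
    g ∈ pvGAcc grid r c k gs ↔
      g ∈ gs ∨ (pvStarAt grid g.1 g.2 = true ∧
        ∃ i : Nat, i < k ∧ (g.1 - r).natAbs ≤ 1 ∧ (g.2 - (c + i)).natAbs ≤ 1 ∧ ¬(g.1 = r ∧ g.2 = c + i)) := by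
  induction k generalizing c gs with
  | zero => simp [pvGAcc]
  | succ k ih =>
    rw [pvGAcc, ih, mem_pvStarAdd]
    constructor
    · rintro ((hg | ⟨hs, hr, hc, hne⟩) | ⟨hs, i, hi, hr, hc, hne⟩)
      · exact Or.inl hg
      · exact Or.inr ⟨hs, 0, by simpa using ⟨hr, by simpa using hc, by simpa using hne⟩⟩
      · exact Or.inr ⟨hs, i + 1, by omega, hr, by push_cast; omega, by push_cast at hne ⊢; omega⟩
    · rintro (hg | ⟨hs, i, hi, hr, hc, hne⟩)
      · exact Or.inl (Or.inl hg)
      · cases i with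
        | zero => exact Or.inl (Or.inr ⟨hs, hr, by simpa using hc, by simpa using hne⟩)
        | succ i => exact Or.inr ⟨hs, i, by omega, hr, by push_cast at hc ⊢; omega, by push_cast at hne ⊢; omega⟩

theorem nodup_pvGAcc (grid : List String) (r : Int) (k : Nat) (c : Int) (gs : PySem.Set (Int × Int))
    (h : gs.Nodup) : (pvGAcc grid r c k gs).Nodup := by
  induction k generalizing c gs with
  | zero => simpa [pvGAcc] using h
  | succ k ih => exact ih _ _ (nodup_foldl_add_if _ _ h)

theorem pvTw_digit (xs : List Char) (j : Nat) (hj : j < (xs.takeWhile PySem.Chars.isdigit).length) :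
    PySem.Chars.isdigit ((xs.takeWhile PySem.Chars.isdigit).getD j ' ') = true := by
  rw [List.getD_eq_getElem _ _ hj]
  exact List.mem_takeWhile_imp (List.getElem_mem hj)

theorem pvScan_nums_sound (r : Int) : ∀ (c0 : Int) (xs : List Char),
    ∀ n ∈ (pvScanRow r c0 xs).1,
    n.2.1 = r ∧ c0 ≤ n.2.2.1 ∧ n.2.2.1 < n.2.2.2 ∧ n.2.2.2 ≤ c0 + (xs.length : Int) ∧
      ∀ c : Int, n.2.2.1 ≤ c → c < n.2.2.2 →
        PySem.Chars.isdigit (xs.getD (c - c0).toNat ' ') = true := by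
  intro c0 xs
  induction c0, xs using pvScanRow.induct r with
  | case1 c => simp [pvScanRow]
  | case2 c ch rest hd t ih =>
    intro n hn
    have ht : t = (pvDigitsVal ((ch.toNat : Int) - 48) (rest.takeWhile PySem.Chars.isdigit),
        1 + ((rest.takeWhile PySem.Chars.isdigit).length : Int),
        rest.dropWhile PySem.Chars.isdigit) := pvEatRun_eq _ _ _
    clear_value t
    subst ht
    dsimp only at ih
    rw [pvScanRow] at hn
    simp only [if_pos hd, pvEatRun_eq] at hn
    set tw := rest.takeWhile PySem.Chars.isdigit with htw
    set dw := rest.dropWhile PySem.Chars.isdigit with hdw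
    have hlen : tw.length + dw.length = rest.length := by
      rw [htw, hdw, ← List.length_append, List.takeWhile_append_dropWhile]
    simp only [List.mem_cons] at hn
    rcases hn with rfl | hn
    · refine ⟨rfl, le_refl _, by simp; omega, by simp; omega, ?_⟩
      intro cc h1 h2
      simp only at h1 h2 ⊢
      have hi : (cc - c).toNat ≤ tw.length := by omega
      rcases Nat.eq_zero_or_pos (cc - c).toNat with h0 | hpos
      · simpa [h0] using hd
      · obtain ⟨j, hj⟩ : ∃ j, (cc - c).toNat = j + 1 := ⟨(cc - c).toNat - 1, by omega⟩
        have hjtw : j < tw.length := by omega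
        rw [hj]
        simp only [List.getD_cons_succ]
        have : rest = tw ++ dw := (List.takeWhile_append_dropWhile).symm
        rw [this, List.getD_append _ _ _ _ hjtw]
        exact pvTw_digit rest j hjtw
    · obtain ⟨h1, h2, h3, h4, h5⟩ := ih n hn
      refine ⟨h1, by omega, h3, by simp only [List.length_cons] at h4 ⊢; push_cast at h4 ⊢; omega, ?_⟩
      intro cc hc1 hc2
      have h5' := h5 cc hc1 hc2
      have hcc : c + (1 + (tw.length : Int)) ≤ cc := le_trans h2 hc1
      have hidx : (cc - c).toNat = (1 + tw.length) + (cc - (c + (1 + (tw.length:Int)))).toNat := by omega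
      rw [hidx]
      have hrest : rest = tw ++ dw := (List.takeWhile_append_dropWhile).symm
      have : ((ch :: rest).getD (1 + tw.length + (cc - (c + (1 + (tw.length:Int)))).toNat) ' ')
          = dw.getD (cc - (c + (1 + (tw.length:Int)))).toNat ' ' := by
        rw [show 1 + tw.length + (cc - (c + (1 + (tw.length:Int)))).toNat
              = ((cc - (c + (1 + (tw.length:Int)))).toNat + tw.length) + 1 by omega]
        simp only [List.getD_cons_succ]
        rw [hrest, List.getD_append_right _ _ _ _ (by omega)]
        congr 1
        omega
      rw [this]
      exact h5'
  | case3 c ch rest hd ih =>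
    intro n hn
    rw [pvScanRow] at hn
    rw [if_neg hd] at hn
    simp only at hn
    obtain ⟨h1, h2, h3, h4, h5⟩ := ih n hn
    refine ⟨h1, by omega, h3, by simp only [List.length_cons] at h4 ⊢; push_cast at h4 ⊢; omega, ?_⟩
    intro cc hc1 hc2
    have h5' := h5 cc hc1 hc2
    have hcc : c + 1 ≤ cc := le_trans h2 hc1
    have hidx : (cc - c).toNat = (cc - (c + 1)).toNat + 1 := by omega
    rw [hidx]
    simpa using h5'

theorem pvIsdigit_star : PySem.Chars.isdigit '*' = false := by decide

theorem pvScan_gears_iff (r : Int) : ∀ (c0 : Int) (xs : List Char) (g : Int × Int),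
    g ∈ (pvScanRow r c0 xs).2 ↔
      ∃ j : Nat, j < xs.length ∧ g = (r, c0 + (j : Int)) ∧ xs.getD j ' ' = '*' := by
  intro c0 xs
  induction c0, xs using pvScanRow.induct r with
  | case1 c => simp [pvScanRow]
  | case2 c ch rest hd t ih =>
    intro g
    have ht : t = (pvDigitsVal ((ch.toNat : Int) - 48) (rest.takeWhile PySem.Chars.isdigit),
        1 + ((rest.takeWhile PySem.Chars.isdigit).length : Int),
        rest.dropWhile PySem.Chars.isdigit) := pvEatRun_eq _ _ _
    clear_value t
    subst ht
    dsimp only at ih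
    rw [pvScanRow]
    simp only [if_pos hd, pvEatRun_eq]
    set tw := rest.takeWhile PySem.Chars.isdigit with htw
    set dw := rest.dropWhile PySem.Chars.isdigit with hdw
    have hrest : rest = tw ++ dw := (List.takeWhile_append_dropWhile).symm
    have hlen : tw.length + dw.length = rest.length := by
      rw [htw, hdw, ← List.length_append, List.takeWhile_append_dropWhile]
    rw [ih g]
    constructor
    · rintro ⟨j, hj, rfl, hc⟩
      refine ⟨1 + tw.length + j, by simp; omega, by push_cast; ring_nf, ?_⟩
      rw [show 1 + tw.length + j = (tw.length + j) + 1 by omega]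
      simp only [List.getD_cons_succ]
      rw [hrest, List.getD_append_right _ _ _ _ (by omega)]
      rw [show tw.length + j - tw.length = j by omega]
      exact hc
    · rintro ⟨j, hj, rfl, hc⟩
      rcases Nat.lt_or_ge j (1 + tw.length) with hlt | hge
      · exfalso
        rcases Nat.eq_zero_or_pos j with rfl | hpos
        · simp only [List.getD_cons_zero] at hc
          rw [hc] at hd
          simp [pvIsdigit_star] at hd
        · obtain ⟨j', rfl⟩ : ∃ j', j = j' + 1 := ⟨j - 1, by omega⟩
          simp only [List.getD_cons_succ] at hc
          have hj' : j' < tw.length := by omega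
          rw [hrest, List.getD_append _ _ _ _ hj'] at hc
          have := pvTw_digit rest j' hj'
          rw [← htw] at this
          rw [hc] at this
          simp [pvIsdigit_star] at this
      · obtain ⟨j', rfl⟩ : ∃ j', j = 1 + tw.length + j' := ⟨j - 1 - tw.length, by omega⟩
        refine ⟨j', by simp at hj; omega, by push_cast; ring_nf, ?_⟩
        rw [show 1 + tw.length + j' = (tw.length + j') + 1 by omega] at hc
        simp only [List.getD_cons_succ] at hc
        rw [hrest, List.getD_append_right _ _ _ _ (by omega)] at hc
        rw [show tw.length + j' - tw.length = j' by omega] at hc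
        exact hc
  | case3 c ch rest hd ih =>
    intro g
    rw [pvScanRow]
    rw [if_neg hd]
    dsimp only
    by_cases hstar : (ch == '*') = true
    · rw [if_pos hstar]
      simp only [List.mem_cons, ih g]
      constructor
      · rintro (rfl | ⟨j, hj, rfl, hc⟩)
        · exact ⟨0, by simp, by simp, by simpa using (beq_iff_eq.mp hstar)⟩
        · exact ⟨j + 1, by simp; omega, by push_cast; ring_nf, by simpa using hc⟩
      · rintro ⟨j, hj, rfl, hc⟩
        rcases Nat.eq_zero_or_pos j with rfl | hpos
        · exact Or.inl (by simp)
        · obtain ⟨j', rfl⟩ : ∃ j', j = j' + 1 := ⟨j - 1, by omega⟩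
          exact Or.inr ⟨j', by simp at hj; omega, by push_cast; ring_nf, by simpa using hc⟩
    · rw [if_neg hstar]
      rw [ih g]
      constructor
      · rintro ⟨j, hj, rfl, hc⟩
        exact ⟨j + 1, by simp; omega, by push_cast; ring_nf, by simpa using hc⟩
      · rintro ⟨j, hj, rfl, hc⟩
        rcases Nat.eq_zero_or_pos j with rfl | hpos
        · exfalso
          simp only [List.getD_cons_zero] at hc
          exact hstar (by simp [hc])
        · obtain ⟨j', rfl⟩ : ∃ j', j = j' + 1 := ⟨j - 1, by omega⟩
          exact ⟨j', by simp at hj; omega, by push_cast; ring_nf, by simpa using hc⟩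

theorem pvScan_gears_nodup (r : Int) : ∀ (c0 : Int) (xs : List Char),
    (pvScanRow r c0 xs).2.Nodup := by
  intro c0 xs
  induction c0, xs using pvScanRow.induct r with
  | case1 c => simp [pvScanRow]
  | case2 c ch rest hd t ih =>
    rw [pvScanRow]
    simpa only [if_pos hd] using ih
  | case3 c ch rest hd ih =>
    rw [pvScanRow]
    rw [if_neg hd]
    dsimp only
    split
    · refine List.Nodup.cons ?_ ih
      intro hmem
      rw [pvScan_gears_iff] at hmem
      obtain ⟨j, hj, heq, hc⟩ := hmem
      have : c = c + 1 + (j : Int) := congrArg Prod.snd heq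
      omega
    · exact ih

theorem pvSum_if (l : List (List Int)) :
    l.foldl (fun ans vals =>
      if vals.length = 2 then ans + PySem.List.pyGetD vals 0 0 * PySem.List.pyGetD vals 1 0 else ans) 0 =
      (l.map pvContr).sum := by
  have h : ∀ (a : Int), l.foldl (fun ans vals =>
      if vals.length = 2 then ans + PySem.List.pyGetD vals 0 0 * PySem.List.pyGetD vals 1 0 else ans) a =
      l.foldl (fun ans vals => ans + pvContr vals) a := by
    intro a
    apply PySem.List.foldl_congr_mem
    intro acc x _
    by_cases hx : x.length = 2 <;> simp [hx, pvContr]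
  rw [h, PySem.List.foldl_add, zero_add]

theorem pvSum_drop_zeros {α : Type} (l : List α) (F : α → Int) (p : α → Bool)
    (h : ∀ x ∈ l, p x = false → F x = 0) : (l.map F).sum = ((l.filter p).map F).sum := by
  induction l with
  | nil => simp
  | cons x l ih =>
    by_cases hx : p x = true
    · simp [hx, ih (fun y hy => h y (List.mem_cons_of_mem _ hy))]
    · have hx0 : F x = 0 := h x (List.mem_cons_self) (by simpa using hx)
      simp [hx, hx0, ih (fun y hy => h y (List.mem_cons_of_mem _ hy))]

theorem pvPairFold (grid : List String) :
    (PySem.List.enumerate grid).foldl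
      (fun (acc : List (Int × Int × Int × Int) × List (Int × Int)) rv =>
        let p := pvScanRow rv.1 0 rv.2.toList
        (acc.1 ++ p.1, acc.2 ++ p.2)) ([], []) = (pvNums grid, pvGears grid) := by
  rw [pvNums, pvGears]
  have h : ∀ (l : List (Int × String)) (a : List (Int × Int × Int × Int)) (b : List (Int × Int)),
      l.foldl (fun (acc : List (Int × Int × Int × Int) × List (Int × Int)) rv =>
        let p := pvScanRow rv.1 0 rv.2.toList
        (acc.1 ++ p.1, acc.2 ++ p.2)) (a, b) =
      (a ++ l.flatMap (fun rv => (pvScanRow rv.1 0 rv.2.toList).1),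
       b ++ l.flatMap (fun rv => (pvScanRow rv.1 0 rv.2.toList).2)) := by
    intro l
    induction l with
    | nil => simp
    | cons rv l ih => intro a b; simp [ih, List.flatMap_cons]
  simpa using h (PySem.List.enumerate grid) [] []

theorem pvStarAt_iff (grid : List String) (a b : Int) :
    pvStarAt grid a b = true ↔
      ∃ (i j : Nat), a = (i : Int) ∧ b = (j : Int) ∧ i < grid.length ∧
        j < (grid.getD i "").toList.length ∧ (grid.getD i "").toList.getD j ' ' = '*' := by
  rw [pvStarAt]
  constructor
  · intro h
    split_ifs at h with h1 h2
    obtain ⟨i, hi⟩ : ∃ i : Nat, a = (i : Int) := ⟨a.toNat, by omega⟩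
    obtain ⟨j, hj⟩ : ∃ j : Nat, b = (j : Int) := ⟨b.toNat, by omega⟩
    subst hi hj
    simp only [PySem.List.pyGetD_natCast] at h h2 h1
    exact ⟨i, j, rfl, rfl, by exact_mod_cast h1.2, by exact_mod_cast h2.2, by simpa using h⟩
  · rintro ⟨i, j, rfl, rfl, hi, hj, hc⟩
    rw [if_pos ⟨Int.natCast_nonneg i, by exact_mod_cast hi⟩]
    simp only [PySem.List.pyGetD_natCast]
    rw [if_pos ⟨Int.natCast_nonneg j, by exact_mod_cast hj⟩]
    simpa [List.getD] using hc

theorem pvFlushA_eq' (gears : PySem.Set (Int × Int)) (part : List Char) (d : PySem.Dict (Int × Int) (List Int)) :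
    pvFlushA gears part d = pvFlushV gears (pvIntOfDigits part) d := rfl

theorem pvAinner_cons (grid : List String) (r : Int) (ch : Char) (rest : List Char) (c0 : Int)
    (st : PySem.Dict (Int × Int) (List Int) × List Char × PySem.Set (Int × Int)) :
    pvAinner grid r (ch :: rest) c0 st = pvAinner grid r rest (c0 + 1) (pvStepA grid r st (c0, ch)) := by
  simp [pvAinner, PySem.List.enumerate_cons]

theorem pvStepA_digit (grid : List String) (r c : Int) (ch : Char) (hd : PySem.Chars.isdigit ch = true)
    (d : PySem.Dict (Int × Int) (List Int)) (part : List Char) (gears : PySem.Set (Int × Int)) :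
    pvStepA grid r (d, part, gears) (c, ch) = (d, part ++ [ch], pvStarAdd grid r c gears) := by
  simp [pvStepA, hd, pvStarAdd]

theorem pvStepA_nond_nil (grid : List String) (r c : Int) (ch : Char) (hd : ¬ PySem.Chars.isdigit ch = true)
    (d : PySem.Dict (Int × Int) (List Int)) (gears : PySem.Set (Int × Int)) :
    pvStepA grid r (d, [], gears) (c, ch) = (d, [], PySem.Set.empty) := by
  simp [pvStepA, hd]

theorem pvStepA_nond (grid : List String) (r c : Int) (ch : Char) (hd : ¬ PySem.Chars.isdigit ch = true)
    (d : PySem.Dict (Int × Int) (List Int)) (part : List Char) (hp : part ≠ []) (gears : PySem.Set (Int × Int)) :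
    pvStepA grid r (d, part, gears) (c, ch) = (pvFlushA gears part d, [], PySem.Set.empty) := by
  simp [pvStepA, hd, hp]

theorem pvL12 (grid : List String) (r : Int) :
    ∀ N (xs : List Char), xs.length ≤ N → ∀ (c0 : Int) (d : PySem.Dict (Int × Int) (List Int)),
      (pvAinner grid r xs c0 (d, [], PySem.Set.empty) =
        (pvScanRow r c0 xs).1.foldl (pvFlushRun grid) d) ∧
      (∀ (part : List Char) (gears : PySem.Set (Int × Int)), part ≠ [] →
        pvAinner grid r xs c0 (d, part, gears) =
          (pvScanRow r (c0 + ((xs.takeWhile PySem.Chars.isdigit).length : Int))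
              (xs.dropWhile PySem.Chars.isdigit)).1.foldl (pvFlushRun grid)
            (pvFlushV (pvGAcc grid r c0 (xs.takeWhile PySem.Chars.isdigit).length gears)
              (pvDigitsVal 0 (part ++ xs.takeWhile PySem.Chars.isdigit)) d)) := by
  intro N
  induction N with
  | zero =>
    intro xs hxs c0 d
    have hnil : xs = [] := List.length_eq_zero_iff.mp (Nat.le_zero.mp hxs)
    subst hnil
    constructor
    · simp [pvAinner, PySem.List.enumerate_nil, pvScanRow]
    · intro part gears hne
      simp [pvAinner, PySem.List.enumerate_nil, pvScanRow, pvGAcc, hne, pvFlushA_eq', pvIntOfDigits, pvDigitsVal]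
  | succ N ihN =>
    intro xs hxs c0 d
    cases xs with
    | nil =>
      constructor
      · simp [pvAinner, PySem.List.enumerate_nil, pvScanRow]
      · intro part gears hne
        simp [pvAinner, PySem.List.enumerate_nil, pvScanRow, pvGAcc, hne, pvFlushA_eq', pvIntOfDigits, pvDigitsVal]
    | cons ch rest =>
      have hr : rest.length ≤ N := by simp at hxs; omega
      constructor
      · by_cases hd : PySem.Chars.isdigit ch = true
        · rw [pvAinner_cons, pvStepA_digit grid r c0 ch hd, List.nil_append]
          rw [(ihN rest hr (c0 + 1) d).2 [ch] (pvStarAdd grid r c0 PySem.Set.empty) (by simp)]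
          rw [pvScanRow]
          rw [if_pos hd]
          simp only [pvEatRun_eq]
          rw [List.foldl_cons]
          rw [show (c0 + 1) + (((rest.takeWhile PySem.Chars.isdigit).length : Nat) : Int)
                = c0 + (1 + (((rest.takeWhile PySem.Chars.isdigit).length : Nat) : Int)) from by ring]
          simp only [pvFlushRun, pvRunGears]
          rw [show ((c0 + (1 + (((rest.takeWhile PySem.Chars.isdigit).length : Nat) : Int))) - c0).toNat
                = (rest.takeWhile PySem.Chars.isdigit).length + 1 from by omega]
          rw [pvGAcc]
          simp [pvDigitsVal]
        · rw [pvAinner_cons, pvStepA_nond_nil grid r c0 ch hd]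
          rw [(ihN rest hr (c0 + 1) d).1]
          rw [pvScanRow]
          rw [if_neg hd]
      · intro part gears hne
        by_cases hd : PySem.Chars.isdigit ch = true
        · rw [pvAinner_cons, pvStepA_digit grid r c0 ch hd]
          rw [(ihN rest hr (c0 + 1) d).2 (part ++ [ch]) (pvStarAdd grid r c0 gears) (by simp)]
          rw [List.takeWhile_cons_of_pos hd, List.dropWhile_cons_of_pos hd]
          simp only [List.length_cons]
          rw [show (c0 + 1) + (((rest.takeWhile PySem.Chars.isdigit).length : Nat) : Int)
                = c0 + ((((rest.takeWhile PySem.Chars.isdigit).length + 1 : Nat)) : Int) from by push_cast; ring]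
          rw [pvGAcc]
          rw [List.append_assoc]
          rfl
        · rw [pvAinner_cons, pvStepA_nond grid r c0 ch hd d part hne]
          rw [(ihN rest hr (c0 + 1) (pvFlushA gears part d)).1]
          rw [List.takeWhile_cons_of_neg hd, List.dropWhile_cons_of_neg hd]
          rw [pvScanRow]
          rw [if_neg hd]
          simp only [List.length_nil, Nat.cast_zero, add_zero, List.append_nil]
          rw [pvGAcc, pvFlushA_eq']
          rfl

theorem pvRowA_eq (grid : List String) (d : PySem.Dict (Int × Int) (List Int)) (rv : Int × String) :
    pvRowA grid d rv = (pvScanRow rv.1 0 rv.2.toList).1.foldl (pvFlushRun grid) d := by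
  rw [show pvRowA grid d rv = pvAinner grid rv.1 rv.2.toList 0 (d, [], PySem.Set.empty) from rfl]
  exact (pvL12 grid rv.1 rv.2.toList.length rv.2.toList le_rfl 0 d).1

theorem pvDict_eq (grid : List String) :
    (PySem.List.enumerate grid).foldl (pvRowA grid) PySem.Dict.empty =
      (pvInc grid).foldl (fun d p => d.modify p.1 [] (fun l => l ++ [p.2])) PySem.Dict.empty := by
  have h1 : (PySem.List.enumerate grid).foldl (pvRowA grid) PySem.Dict.empty =
      (pvNums grid).foldl (pvFlushRun grid) PySem.Dict.empty := by
    rw [pvNums, List.foldl_flatMap]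
    apply PySem.List.foldl_congr_mem
    intro d rv _
    exact pvRowA_eq grid d rv
  rw [h1, pvInc, List.foldl_flatMap]
  apply PySem.List.foldl_congr_mem
  intro d n _
  rw [List.foldl_map]
  rfl

theorem pvBucket_getD (grid : List String) (g : Int × Int) :
    ((PySem.List.enumerate grid).foldl (pvRowA grid) PySem.Dict.empty).getD g [] = pvBucket grid g := by
  rw [pvDict_eq, PySem.Dict.getD_foldl_modify_append, PySem.Dict.getD_empty, List.nil_append, pvBucket]

theorem pvKeys_eq (grid : List String) :
    ((PySem.List.enumerate grid).foldl (pvRowA grid) PySem.Dict.empty).keys =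
      PySem.Set.ofList ((pvInc grid).map (·.1)) := by
  rw [pvDict_eq]
  rw [PySem.Dict.keys_foldl_modify_key (pvInc grid) (fun p : (Int × Int) × Int => p.1) [] (fun _ p => (fun l => l ++ [p.2]))]
  rw [PySem.Dict.keys_empty, PySem.Set.ofList_eq_foldl]
  rfl

theorem pvKeys_nodup (grid : List String) :
    ((PySem.List.enumerate grid).foldl (pvRowA grid) PySem.Dict.empty).keys.Nodup := by
  rw [pvDict_eq]
  exact PySem.Dict.nodup_keys_foldl_modify_key _ (fun p : (Int × Int) × Int => p.1) [] (fun _ p => (fun l => l ++ [p.2])) _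
    (by rw [PySem.Dict.keys_empty]; exact List.nodup_nil)

theorem pvGetD_eq (grid : List String) (k : Nat) (hk : k < grid.length) : grid.getD k "" = grid[k] := by
  rw [List.getD_eq_getElem?_getD, List.getElem?_eq_getElem hk, Option.getD_some]

theorem mem_pvGears_iff (grid : List String) (g : Int × Int) :
    g ∈ pvGears grid ↔ pvStarAt grid g.1 g.2 = true := by
  rw [pvGears, List.mem_flatMap, pvStarAt_iff]
  constructor
  · rintro ⟨rv, hrv, hg⟩
    rw [PySem.List.mem_enumerate_iff] at hrv
    obtain ⟨k, hk, rfl⟩ := hrv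
    rw [pvScan_gears_iff] at hg
    obtain ⟨j, hj, rfl, hc⟩ := hg
    dsimp only at hj hc ⊢
    refine ⟨k, j, by ring, by ring, hk, ?_, ?_⟩
    · rw [pvGetD_eq grid k hk]; exact hj
    · rw [pvGetD_eq grid k hk]; exact hc
  · rintro ⟨i, j, hg1, hg2, hi, hj, hc⟩
    refine ⟨((0:Int) + (i:Int), grid[i]), (PySem.List.mem_enumerate_iff _ _ _).mpr ⟨i, hi, rfl⟩, ?_⟩
    rw [pvScan_gears_iff]
    refine ⟨j, ?_, ?_, ?_⟩
    · rw [pvGetD_eq grid i hi] at hj; exact hj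
    · dsimp only
      rw [Prod.ext_iff]
      exact ⟨by rw [hg1]; ring, by rw [hg2]; ring⟩
    · rw [pvGetD_eq grid i hi] at hc; exact hc

theorem pvGears_fst (rv : Int × String) (g : Int × Int)
    (h : g ∈ (pvScanRow rv.1 0 rv.2.toList).2) : g.1 = rv.1 := by
  rw [pvScan_gears_iff] at h
  obtain ⟨j, _, rfl, _⟩ := h
  rfl

theorem pvGears_nodup_aux (l : List (Int × String)) (h : (l.map Prod.fst).Nodup) :
    (l.flatMap (fun rv => (pvScanRow rv.1 0 rv.2.toList).2)).Nodup := by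
  induction l with
  | nil => simp
  | cons rv l ih =>
    rw [List.flatMap_cons]
    rw [List.map_cons, List.nodup_cons] at h
    refine List.Nodup.append (pvScan_gears_nodup rv.1 0 rv.2.toList) (ih h.2) ?_
    intro g hg1 hg2
    rw [List.mem_flatMap] at hg2
    obtain ⟨rv', hrv', hg2⟩ := hg2
    have e1 := pvGears_fst rv g hg1
    have e2 := pvGears_fst rv' g hg2
    exact h.1 (by rw [← e1, e2]; exact List.mem_map_of_mem hrv')

theorem pvGears_nodup (grid : List String) : (pvGears grid).Nodup := by
  apply pvGears_nodup_aux
  rw [PySem.List.map_fst_enumerate]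
  exact PySem.List.nodup_pyRange_one 0 _

theorem pvNums_sound (grid : List String) (n : Int × Int × Int × Int) (hn : n ∈ pvNums grid) :
    ∃ i : Nat, i < grid.length ∧ n.2.1 = (i : Int) ∧ 0 ≤ n.2.2.1 ∧ n.2.2.1 < n.2.2.2 ∧
      n.2.2.2 ≤ (((grid.getD i "").toList.length : Nat) : Int) ∧
      ∀ c : Int, n.2.2.1 ≤ c → c < n.2.2.2 →
        PySem.Chars.isdigit ((grid.getD i "").toList.getD c.toNat ' ') = true := by
  rw [pvNums, List.mem_flatMap] at hn
  obtain ⟨rv, hrv, hn⟩ := hn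
  rw [PySem.List.mem_enumerate_iff] at hrv
  obtain ⟨k, hk, rfl⟩ := hrv
  obtain ⟨h1, h2, h3, h4, h5⟩ := pvScan_nums_sound _ _ _ n hn
  have hgd : grid.getD k "" = grid[k] := pvGetD_eq grid k hk
  refine ⟨k, hk, by simpa using h1, by simpa using h2, h3, ?_, ?_⟩
  · rw [hgd]; simpa using h4
  · intro c hc1 hc2
    have := h5 c hc1 hc2
    rw [hgd]
    simpa using this


theorem pvMem_runGears_iff (grid : List String) (n : Int × Int × Int × Int) (g : Int × Int)
    (hn : n ∈ pvNums grid) (hg : pvStarAt grid g.1 g.2 = true) :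
    g ∈ pvRunGears grid n ↔ pvTouches g n = true := by
  obtain ⟨i, hi, hr, h0, hlt, hle, hdig⟩ := pvNums_sound grid n hn
  rw [pvRunGears, mem_pvGAcc]
  simp only [PySem.Set.empty, List.not_mem_nil, false_or]
  rw [pvTouches]
  constructor
  · rintro ⟨-, i0, hik, ha, hb, -⟩
    simp only [Bool.and_eq_true, decide_eq_true_eq]
    refine ⟨⟨?_, ?_⟩, ?_⟩ <;> omega
  · intro ht
    simp only [Bool.and_eq_true, decide_eq_true_eq] at ht
    obtain ⟨⟨ha, hb⟩, hc⟩ := ht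
    refine ⟨hg, (max n.2.2.1 (min g.2 (n.2.2.2 - 1)) - n.2.2.1).toNat, by omega, by omega, by omega, ?_⟩
    rintro ⟨he1, he2⟩
    -- g would be a digit cell of the run, but it is a '*' cell
    set cc : Int := n.2.2.1 + ((max n.2.2.1 (min g.2 (n.2.2.2 - 1)) - n.2.2.1).toNat : Int) with hcc
    have hin1 : n.2.2.1 ≤ cc := by omega
    have hin2 : cc < n.2.2.2 := by omega
    have hdig' := hdig cc hin1 hin2
    rw [pvStarAt_iff] at hg
    obtain ⟨i', j', hgi, hgj, hi', hj', hstar⟩ := hg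
    have hii : i' = i := by omega
    have hjj : j' = cc.toNat := by omega
    rw [hii, hjj] at hstar
    rw [hstar] at hdig'
    rw [pvIsdigit_star] at hdig'
    exact Bool.false_ne_true hdig'

theorem pvBucket_eq_touch_aux (grid : List String) (g : Int × Int) (hg : pvStarAt grid g.1 g.2 = true) :
    ∀ (l : List (Int × Int × Int × Int)), (∀ n ∈ l, n ∈ pvNums grid) →
      (((l.flatMap (fun n => (pvRunGears grid n).map (fun g' => (g', n.1)))).filter
          (fun p => p.1 == g)).map (·.2)) =
        (l.filter (fun n => pvTouches g n)).map (·.1) := by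
  intro l
  induction l with
  | nil => simp
  | cons n l ih =>
    intro hsub
    rw [List.flatMap_cons, List.filter_append, List.map_append]
    rw [List.filter_map, List.filter_cons]
    have hmem := pvMem_runGears_iff grid n g (hsub n List.mem_cons_self) hg
    have hnd : (pvRunGears grid n).Nodup := nodup_pvGAcc grid _ _ _ _ List.nodup_nil
    have hfil : (pvRunGears grid n).filter ((fun p : (Int × Int) × Int => p.1 == g) ∘ (fun g' => (g', n.1)))
        = (pvRunGears grid n).filter (· == g) := by rfl
    rw [hfil, List.filter_beq]
    by_cases ht : pvTouches g n = true
    · have hgm : g ∈ pvRunGears grid n := hmem.mpr ht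
      rw [List.count_eq_one_of_mem hnd hgm, if_pos ht]
      simp only [List.replicate_one, List.map_cons, List.map_nil, List.singleton_append]
      rw [ih (fun m hm => hsub m (List.mem_cons_of_mem _ hm))]
    · have hgm : g ∉ pvRunGears grid n := fun hmm => ht (hmem.mp hmm)
      rw [List.count_eq_zero.mpr hgm]
      simp only [List.replicate_zero, List.map_nil, List.nil_append, eq_false_intro ht, if_false]
      exact ih (fun m hm => hsub m (List.mem_cons_of_mem _ hm))

theorem pvBucket_eq_touch (grid : List String) (g : Int × Int) (hg : pvStarAt grid g.1 g.2 = true) :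
    pvBucket grid g = ((pvNums grid).filter (fun n => pvTouches g n)).map (·.1) := by
  rw [pvBucket, pvInc]
  exact pvBucket_eq_touch_aux grid g hg (pvNums grid) (fun n hn => hn)

theorem pvBucket_of_not_key (grid : List String) (g : Int × Int)
    (h : g ∉ (pvInc grid).map (·.1)) : pvBucket grid g = [] := by
  rw [pvBucket, List.filter_eq_nil_iff.mpr, List.map_nil]
  intro p hp
  simp only [beq_iff_eq]
  intro hpg
  exact h (List.mem_map.mpr ⟨p, hp, hpg⟩)

theorem pvKey_star (grid : List String) (k : Int × Int)
    (h : k ∈ (pvInc grid).map (·.1)) : pvStarAt grid k.1 k.2 = true := by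
  rw [List.mem_map] at h
  obtain ⟨p, hp, rfl⟩ := h
  rw [pvInc, List.mem_flatMap] at hp
  obtain ⟨n, hn, hp⟩ := hp
  rw [List.mem_map] at hp
  obtain ⟨g', hg', rfl⟩ := hp
  rw [pvRunGears, mem_pvGAcc] at hg'
  simp only [PySem.Set.empty, List.not_mem_nil, false_or] at hg'
  exact hg'.1

theorem pvSumB (gl : List (Int × Int)) (nums : List (Int × Int × Int × Int)) :
    gl.foldl (fun total g =>
      let touching := (nums.filter (fun n => pvTouches g n)).map (fun n => n.1)
      if touching.length = 2 then
        total + PySem.List.pyGetD touching 0 0 * PySem.List.pyGetD touching 1 0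
      else total) 0 =
      (gl.map (fun g => pvContr ((nums.filter (fun n => pvTouches g n)).map (fun n => n.1)))).sum := by
  have h : gl.foldl (fun total g =>
      let touching := (nums.filter (fun n => pvTouches g n)).map (fun n => n.1)
      if touching.length = 2 then
        total + PySem.List.pyGetD touching 0 0 * PySem.List.pyGetD touching 1 0
      else total) 0 =
      gl.foldl (fun total g =>
        total + pvContr ((nums.filter (fun n => pvTouches g n)).map (fun n => n.1))) 0 := by
    apply PySem.List.foldl_congr_mem
    intro acc g _
    by_cases hx : ((nums.filter (fun n => pvTouches g n)).map (fun n => n.1)).length = 2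
    · rw [if_pos hx, pvContr, if_pos hx]
    · rw [if_neg hx, pvContr, if_neg hx, add_zero]
  rw [h, PySem.List.foldl_add, zero_add]


-- ===== VERDICT (by name: the statement is the Claim_ definition above) =====
theorem walk_grid_spec : Claim_equal_walk_grid := by
  unfold Claim_equal_walk_grid
  intro grid _
  unfold Spec_walk_grid
  simp only [walk_grid, walk_grid_alt]
  rw [pvPairFold]
  dsimp only
  rw [pvSum_if, pvSumB]
  rw [PySem.Dict.values_eq_map_keys _ (pvKeys_nodup grid) ([] : List Int)]
  rw [List.map_map]
  simp only [Function.comp_def, pvBucket_getD]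
  rw [pvKeys_eq]
  have hRHS : (pvGears grid).map (fun g => pvContr (((pvNums grid).filter (fun n => pvTouches g n)).map (fun n => n.1))) =
      (pvGears grid).map (fun g => pvContr (pvBucket grid g)) := by
    apply List.map_congr_left
    intro g hgm
    rw [← pvBucket_eq_touch grid g ((mem_pvGears_iff grid g).mp hgm)]
  rw [hRHS]
  have hzero : ∀ g ∈ pvGears grid,
      decide (g ∈ PySem.Set.ofList ((pvInc grid).map (·.1))) = false → pvContr (pvBucket grid g) = 0 := by
    intro g _ hc
    have hnm : g ∉ (pvInc grid).map (·.1) := by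
      rw [decide_eq_false_iff_not] at hc
      intro hm
      exact hc ((PySem.Set.mem_ofList _ _).mpr hm)
    rw [pvBucket_of_not_key grid g hnm]
    rfl
  rw [pvSum_drop_zeros (pvGears grid) (fun g => pvContr (pvBucket grid g))
      (fun g => decide (g ∈ PySem.Set.ofList ((pvInc grid).map (·.1)))) hzero]
  have hperm : ((pvGears grid).filter
      (fun g => decide (g ∈ PySem.Set.ofList ((pvInc grid).map (·.1))))).Perm
      (PySem.Set.ofList ((pvInc grid).map (·.1))) := by
    refine (List.perm_ext_iff_of_nodup (List.Nodup.filter _ (pvGears_nodup grid))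
      (PySem.Set.nodup_ofList _)).mpr ?_
    intro a
    rw [List.mem_filter]
    constructor
    · rintro ⟨-, hc⟩
      exact of_decide_eq_true hc
    · intro ha
      refine ⟨?_, decide_eq_true ha⟩
      have hstar := pvKey_star grid a ((PySem.Set.mem_ofList _ _).mp ha)
      exact (mem_pvGears_iff grid a).mpr hstar
  rw [(hperm.map (fun g => pvContr (pvBucket grid g))).sum_eq]
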